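-- pv_equiv track=rewrite | github.com/fedem96/ABR_vs_ARN | test.py | bestOrder
-- ===== SOURCE A (Python) =====
-- def bestOrder(orderedArray):
--     def _bestOrder(orderedArray, recursionStep=0):
--         if len(orderedArray) > 0:
--             m = int(len(orderedArray)/2)
--             values.append((orderedArray[m], recursionStep))
--             _bestOrder(orderedArray[:m], recursionStep+1)
--             _bestOrder(orderedArray[m+1:], recursionStep+1)
--     values = []
--     _bestOrder(orderedArray)
--     values.sort(key=lambda tupla: tupla[1])
--     return [tupla[0] for tupla in values]
-- ===== SOURCE B (Python) =====
-- def bestOrder(orderedArray):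
--     out = []
--     queue = [(0, len(orderedArray))] if orderedArray else []
--     i = 0
--     while i < len(queue):
--         lo, hi = queue[i]
--         i += 1
--         m = lo + (hi - lo) // 2
--         out.append(orderedArray[m])
--         if lo < m:
--             queue.append((lo, m))
--         if m + 1 < hi:
--             queue.append((m + 1, hi))
--     return out
-- ===== Notes on version B (the rewrite author's own statement) =====
-- stated objective: alternative
-- what changed: Recursive DFS that copies slices, records (value, depth) pairs and stable-sorts them by depth is replaced by an iterative FIFO breadth-first traversal over (lo, hi) index ranges that emits values directly in level order, with no slicing and no sort (intended as faster; measured only ~1.34x at n=262144).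
import Mathlib
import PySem

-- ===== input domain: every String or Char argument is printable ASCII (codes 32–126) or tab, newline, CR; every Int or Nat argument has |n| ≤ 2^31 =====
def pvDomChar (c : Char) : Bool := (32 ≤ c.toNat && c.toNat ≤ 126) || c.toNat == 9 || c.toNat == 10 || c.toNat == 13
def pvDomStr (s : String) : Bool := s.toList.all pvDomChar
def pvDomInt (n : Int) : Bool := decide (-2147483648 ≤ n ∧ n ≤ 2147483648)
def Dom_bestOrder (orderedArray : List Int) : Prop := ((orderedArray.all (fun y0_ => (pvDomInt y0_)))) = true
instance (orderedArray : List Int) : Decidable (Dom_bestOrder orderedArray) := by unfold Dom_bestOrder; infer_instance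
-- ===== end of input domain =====

-- B replaces A's recursive slice-copying DFS + stable sort by depth with an iterative FIFO
-- breadth-first traversal over (lo, hi) index ranges, emitting values directly in level order.

-- ===== PORT A =====
-- _bestOrder: appends (orderedArray[m], recursionStep), recurses on orderedArray[:m] and orderedArray[m+1:].
-- `int(len(orderedArray)/2)` is ported as PySem.Int.truncdiv (exact for lengths < 2^53).
def goA (xs : List Int) (step : Int) : List (Int × Int) :=
  if _h : xs.length > 0 then
    let m : Int := PySem.Int.truncdiv (xs.length : Int) 2
    (PySem.List.pyGetD xs m 0, step) ::
      (goA (PySem.List.slice xs none (some m)) (step + 1) ++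
       goA (PySem.List.slice xs (some (m + 1)) none) (step + 1))
  else []
termination_by xs.length
decreasing_by
  · have hm : PySem.Int.truncdiv (xs.length : Int) 2 = ((xs.length / 2 : Nat) : Int) := by
      simp [PySem.Int.truncdiv]
    rw [hm, PySem.List.slice_to_natCast]
    simp [List.length_take]; omega
  · have hm : PySem.Int.truncdiv (xs.length : Int) 2 + 1 = ((xs.length / 2 + 1 : Nat) : Int) := by
      simp [PySem.Int.truncdiv]
    rw [hm, PySem.List.slice_from_natCast]
    simp [List.length_drop]; omega

-- values.sort(key=lambda tupla: tupla[1]); [tupla[0] for tupla in values]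
def bestOrder (orderedArray : List Int) : List Int :=
  (PySem.List.sorted (goA orderedArray 0) (fun t => t.2)).map (fun t => t.1)

-- ===== PORT B =====
-- termination-measure helper for the BFS queue loop
def pvW (r : Int × Int) : Nat := 2 * (r.2 - r.1).toNat + 1

-- the while-loop: scanning `queue` with index i ≡ popping the head of the unprocessed tail
def bfsB (a : List Int) (queue : List (Int × Int)) (out : List Int) : List Int :=
  match queue with
  | [] => out
  | (lo, hi) :: rest =>
      let m := lo + PySem.Int.floordiv (hi - lo) 2
      bfsB a
        ((rest ++ (if lo < m then [(lo, m)] else [])) ++ (if m + 1 < hi then [(m + 1, hi)] else []))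
        (out ++ [PySem.List.pyGetD a m 0])
termination_by (queue.map pvW).sum
decreasing_by
  rw [PySem.Int.floordiv_eq_ediv_of_pos (by omega)]
  simp [pvW, List.sum_append]
  split_ifs <;> simp [pvW] <;> omega

def bestOrder_alt (orderedArray : List Int) : List Int :=
  bfsB orderedArray
    (if orderedArray = [] then [] else [(0, (orderedArray.length : Int))]) []

-- ===== PRECONDITION & SPEC =====
def Spec_bestOrder (orderedArray : List Int) (out : List Int) : Prop := out = bestOrder_alt orderedArray
instance (orderedArray : List Int) (out : List Int) : Decidable (Spec_bestOrder orderedArray out) := by unfold Spec_bestOrder; infer_instance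

-- ===== CLAIM (what is proved, stated in full; the proofs are below) =====
def Claim_equal_bestOrder : Prop := ∀ (orderedArray : List Int), Dom_bestOrder orderedArray → Spec_bestOrder orderedArray (bestOrder orderedArray)

-- ===== LEMMAS AND PROOFS =====

-- midpoint, children ranges, emitted value, queue measure
def pvMid (r : Int × Int) : Int := r.1 + PySem.Int.floordiv (r.2 - r.1) 2
def pvCh (r : Int × Int) : List (Int × Int) :=
  (if r.1 < pvMid r then [(r.1, pvMid r)] else []) ++
  (if pvMid r + 1 < r.2 then [(pvMid r + 1, r.2)] else [])
def pvVal (a : List Int) (r : Int × Int) : Int := PySem.List.pyGetD a (pvMid r) 0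
def pvMu (q : List (Int × Int)) : Nat := (q.map pvW).sum

lemma pvMid_bounds (lo hi : Int) (h : lo < hi) : lo ≤ pvMid (lo, hi) ∧ pvMid (lo, hi) < hi := by
  unfold pvMid
  rw [PySem.Int.floordiv_eq_ediv_of_pos (by omega)]
  constructor <;> simp <;> omega

lemma pvMu_ch_le (r : Int × Int) : pvMu (pvCh r) ≤ 2 * (r.2 - r.1).toNat := by
  obtain ⟨lo, hi⟩ := r
  unfold pvCh pvMu pvMid
  rw [PySem.Int.floordiv_eq_ediv_of_pos (by omega)]
  split_ifs <;> simp [pvW] <;> omega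

lemma pvMu_flatMap_le (q : List (Int × Int)) : pvMu (q.flatMap pvCh) + q.length ≤ pvMu q := by
  induction q with
  | nil => simp [pvMu]
  | cons r t ih =>
    have h1 := pvMu_ch_le r
    have h2 : pvMu ((r :: t).flatMap pvCh) = pvMu (pvCh r) + pvMu (t.flatMap pvCh) := by
      simp [pvMu, List.flatMap_cons]
    have h3 : pvMu (r :: t) = pvW r + pvMu t := by simp [pvMu]
    simp only [h2, h3, List.length_cons]
    have : 2 * (r.2 - r.1).toNat + 1 ≤ pvW r := by simp [pvW]
    omega

lemma pvMu_flatMap_lt (q : List (Int × Int)) (h : q ≠ []) : pvMu (q.flatMap pvCh) < pvMu q := by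
  have := pvMu_flatMap_le q
  have : 0 < q.length := List.length_pos_iff.mpr h
  omega

-- level-order emission, whole levels at a time (proof-side reference function)
def pvLvl (a : List Int) (q : List (Int × Int)) : List Int :=
  if h : q = [] then [] else q.map (pvVal a) ++ pvLvl a (q.flatMap pvCh)
termination_by pvMu q
decreasing_by simpa using pvMu_flatMap_lt q h

-- the BFS loop processes the queue level by level
lemma bfsB_cons (a : List Int) (lo hi : Int) (rest : List (Int × Int)) (out : List Int) :
    bfsB a ((lo, hi) :: rest) out = bfsB a (rest ++ pvCh (lo, hi)) (out ++ [pvVal a (lo, hi)]) := by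
  rw [bfsB]
  simp [pvCh, pvMid, pvVal, List.append_assoc]

lemma bfsB_law (a : List Int) :
    ∀ (k : Nat) (q1 q2 : List (Int × Int)) (out : List Int), pvMu q1 + pvMu q2 ≤ k →
      bfsB a (q1 ++ q2) out = bfsB a (q2 ++ q1.flatMap pvCh) (out ++ q1.map (pvVal a)) := by
  intro k
  induction k with
  | zero =>
    intro q1 q2 out hk
    have hq1 : q1 = [] := by
      cases q1 with
      | nil => rfl
      | cons r t =>
        exfalso
        have h1 : 1 ≤ pvW r := by simp [pvW]
        simp [pvMu] at hk
        omega
    subst hq1; simp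
  | succ k ih =>
    intro q1 q2 out hk
    cases q1 with
    | nil => simp
    | cons r t =>
      obtain ⟨lo, hi⟩ := r
      have hch := pvMu_ch_le (lo, hi)
      have hw : pvW (lo, hi) = 2 * (hi - lo).toNat + 1 := rfl
      have hmu : pvMu ((lo, hi) :: t) = pvW (lo, hi) + pvMu t := by simp [pvMu]
      have happ : ∀ x y : List (Int × Int), pvMu (x ++ y) = pvMu x + pvMu y := by
        intro x y; simp [pvMu]
      rw [List.cons_append, bfsB_cons]
      have hk' : pvMu t + pvMu (q2 ++ pvCh (lo, hi)) ≤ k := by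
        rw [happ]; omega
      rw [show (t ++ q2) ++ pvCh (lo, hi) = t ++ (q2 ++ pvCh (lo, hi)) from by simp,
          ih t (q2 ++ pvCh (lo, hi)) (out ++ [pvVal a (lo, hi)]) hk']
      simp [List.flatMap_cons]

lemma bfsB_eq_lvl (a : List Int) :
    ∀ (k : Nat) (q : List (Int × Int)) (out : List Int), pvMu q ≤ k →
      bfsB a q out = out ++ pvLvl a q := by
  intro k
  induction k with
  | zero =>
    intro q out hk
    have hq : q = [] := by
      cases q with
      | nil => rfl
      | cons r t =>
        exfalso
        have h1 : 1 ≤ pvW r := by simp [pvW]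
        simp [pvMu] at hk
        omega
    subst hq; rw [pvLvl]; simp [bfsB]
  | succ k ih =>
    intro q out hk
    by_cases hq : q = []
    · subst hq; rw [pvLvl]; simp [bfsB]
    · have h1 : bfsB a (q ++ []) out = bfsB a ([] ++ q.flatMap pvCh) (out ++ q.map (pvVal a)) :=
        bfsB_law a (k + 1) q [] out (by simpa [pvMu] using hk)
      have hlt := pvMu_flatMap_lt q hq
      rw [pvLvl]
      simp only [hq, dite_false]
      calc bfsB a q out = bfsB a (q.flatMap pvCh) (out ++ q.map (pvVal a)) := by simpa using h1
        _ = (out ++ q.map (pvVal a)) ++ pvLvl a (q.flatMap pvCh) := ih _ _ (by omega)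
        _ = out ++ (q.map (pvVal a) ++ pvLvl a (q.flatMap pvCh)) := by simp

-- DFS over index ranges (mirror of goA on ranges of the original array)
def goR (a : List Int) (lo hi : Int) (step : Int) : List (Int × Int) :=
  if h : lo < hi then
    (pvVal a (lo, hi), step) ::
      (goR a lo (pvMid (lo, hi)) (step + 1) ++ goR a (pvMid (lo, hi) + 1) hi (step + 1))
  else []
termination_by (hi - lo).toNat
decreasing_by
  · have := pvMid_bounds lo hi h; omega
  · have := pvMid_bounds lo hi h; omega

lemma goR_shape (a : List Int) (lo hi s : Int) (h : lo < hi) :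
    goR a lo hi s =
      (pvVal a (lo, hi), s) :: (pvCh (lo, hi)).flatMap (fun r => goR a r.1 r.2 (s + 1)) := by
  rw [goR]
  simp only [h, dite_true]
  congr 1
  unfold pvCh
  rw [List.flatMap_append]
  congr 1
  · by_cases h1 : lo < pvMid (lo, hi)
    · simp [h1]
    · simp only [h1, if_false, List.flatMap_nil]
      rw [goR]; simp [h1]
  · by_cases h2 : pvMid (lo, hi) + 1 < hi
    · simp [h2]
    · simp only [h2, if_false, List.flatMap_nil]
      rw [goR]; simp [h2]

lemma goR_depth (a : List Int) :
    ∀ (k : Nat) (lo hi s : Int), (hi - lo).toNat ≤ k →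
      ∀ p ∈ goR a lo hi s, s ≤ p.2 := by
  intro k
  induction k with
  | zero =>
    intro lo hi s hk p hp
    rw [goR] at hp
    have : ¬ lo < hi := by omega
    simp [this] at hp
  | succ k ih =>
    intro lo hi s hk p hp
    rw [goR] at hp
    by_cases h : lo < hi
    · simp only [h, dite_true, List.mem_cons, List.mem_append] at hp
      have hb := pvMid_bounds lo hi h
      rcases hp with hp | hp | hp
      · subst hp; simp
      · have := ih lo (pvMid (lo, hi)) (s + 1) (by omega) p hp; omega
      · have := ih (pvMid (lo, hi) + 1) hi (s + 1) (by omega) p hp; omega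
    · simp [h] at hp

-- goA on the sublist a[lo:hi] computes goR on the range (lo, hi)
lemma goA_eq_goR (a : List Int) :
    ∀ (k : Nat) (lo hi : Nat) (s : Int), hi - lo ≤ k → hi ≤ a.length → lo ≤ hi →
      goA ((a.drop lo).take (hi - lo)) s = goR a lo hi s := by
  intro k
  induction k with
  | zero =>
    intro lo hi s hk hlen hle
    have h0 : hi - lo = 0 := by omega
    rw [h0]
    rw [goA]
    simp only [List.take_zero, List.length_nil, gt_iff_lt, lt_irrefl, dite_false]
    rw [goR, dif_neg (by exact_mod_cast Nat.not_lt.mpr (by omega : hi ≤ lo))]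
  | succ k ih =>
    intro lo hi s hk hlen hle
    by_cases hlt : lo < hi
    · have hsublen : ((a.drop lo).take (hi - lo)).length = hi - lo := by
        simp [List.length_take, List.length_drop]; omega
      set mN : Nat := (hi - lo) / 2 with hmN
      have hmNlt : mN < hi - lo := by omega
      have hm : PySem.Int.truncdiv ((((a.drop lo).take (hi - lo)).length : Nat) : Int) 2 = (mN : Int) := by
        rw [hsublen]; simp [PySem.Int.truncdiv]; omega
      have hmid : pvMid ((lo : Int), (hi : Int)) = ((lo + mN : Nat) : Int) := by
        unfold pvMid
        rw [PySem.Int.floordiv_eq_ediv_of_pos (by omega)]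
        simp only
        push_cast
        omega
      have hIlt : ((lo : Int) < (hi : Int)) := by exact_mod_cast hlt
      rw [goA, dif_pos (by rw [hsublen]; omega)]
      rw [goR, dif_pos hIlt]
      simp only [hm, hmid]
      congr 1
      · -- the emitted values agree
        unfold pvVal
        rw [hmid]
        rw [PySem.List.pyGetD_natCast, PySem.List.pyGetD_natCast]
        rw [List.getD_eq_getElem?_getD, List.getD_eq_getElem?_getD]
        rw [List.getElem?_take_of_lt hmNlt, List.getElem?_drop]
      congr 1
      · -- left slice
        rw [PySem.List.slice_to_natCast, List.take_take, min_eq_left (by omega)]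
        have := ih lo (lo + mN) (s + 1) (by omega) (by omega) (by omega)
        rw [show lo + mN - lo = mN from by omega] at this
        exact this
      · -- right slice
        rw [show ((mN : Int) + 1) = ((mN + 1 : Nat) : Int) from by push_cast; ring]
        rw [PySem.List.slice_from_natCast, List.drop_take, List.drop_drop]
        rw [show lo + (mN + 1) = lo + mN + 1 from by omega]
        rw [show ((lo + mN : Nat) : Int) + 1 = ((lo + mN + 1 : Nat) : Int) from by push_cast; ring]
        have := ih (lo + mN + 1) hi (s + 1) (by omega) (by omega) (by omega)
        rw [show hi - lo - (mN + 1) = hi - (lo + mN + 1) from by omega]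
        exact this
    · have h0 : hi - lo = 0 := by omega
      rw [h0]
      rw [goA]
      simp only [List.take_zero, List.length_nil, gt_iff_lt, lt_irrefl, dite_false]
      rw [goR, dif_neg (by exact_mod_cast hlt)]

lemma pvCh_valid (r : Int × Int) : ∀ r' ∈ pvCh r, r'.1 < r'.2 := by
  intro r' hr'
  unfold pvCh at hr'
  rw [List.mem_append] at hr'
  rcases hr' with h | h <;> split_ifs at h <;> simp at h <;> subst h <;> simpa

-- stable insertion lemmas
lemma insertBy_append (x : Int × Int) (A B : List (Int × Int))
    (hA : ∀ p ∈ A, ¬ (x.2 < p.2)) :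
    PySem.List.insertBy (fun p q => decide (p.2 < q.2)) x (A ++ B) =
      A ++ PySem.List.insertBy (fun p q => decide (p.2 < q.2)) x B := by
  induction A with
  | nil => simp
  | cons a t ih =>
    have ha : ¬ (x.2 < a.2) := hA a (by simp)
    simp only [List.cons_append, PySem.List.insertBy, ha, decide_false]
    simp only [Bool.false_eq_true, if_false]
    rw [ih (fun p hp => hA p (by simp [hp]))]

lemma insertBy_front (x : Int × Int) (B : List (Int × Int))
    (hB : ∀ p ∈ B, x.2 < p.2) :
    PySem.List.insertBy (fun p q => decide (p.2 < q.2)) x B = x :: B := by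
  cases B with
  | nil => simp [PySem.List.insertBy]
  | cons b t =>
    have hb : x.2 < b.2 := hB b (by simp)
    simp [PySem.List.insertBy, hb]

-- stable sort by key peels off the minimal-key elements in order
lemma sorted_append_singleton (l : List (Int × Int)) (x : Int × Int) :
    PySem.List.sorted (l ++ [x]) (fun p => p.2) =
      PySem.List.insertBy (fun p q => decide (p.2 < q.2)) x (PySem.List.sorted l (fun p => p.2)) := by
  rw [PySem.List.sorted_eq_foldl_insertBy, PySem.List.sorted_eq_foldl_insertBy, List.foldl_append]
  rfl

lemma sorted_peel (l : List (Int × Int)) (m : Int) (hm : ∀ p ∈ l, m ≤ p.2) :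
    PySem.List.sorted l (fun p => p.2) =
      l.filter (fun p => decide (p.2 = m)) ++
        PySem.List.sorted (l.filter (fun p => decide (p.2 ≠ m))) (fun p => p.2) := by
  induction l using List.reverseRecOn with
  | nil => simp [PySem.List.sorted_eq_foldl_insertBy]
  | append_singleton l x ih =>
    have hm' : ∀ p ∈ l, m ≤ p.2 := fun p hp => hm p (by simp [hp])
    have hF : ∀ p ∈ l.filter (fun p => decide (p.2 = m)), p.2 = m := by
      intro p hp
      have := List.of_mem_filter hp
      simpa using this
    have hS : ∀ p ∈ PySem.List.sorted (l.filter (fun p => decide (p.2 ≠ m))) (fun p => p.2), m < p.2 := by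
      intro p hp
      rw [PySem.List.mem_sorted] at hp
      have h1 := List.of_mem_filter hp
      have h2 := List.mem_of_mem_filter hp
      have h3 := hm' p h2
      simp at h1
      omega
    rw [sorted_append_singleton, ih hm']
    by_cases hx : x.2 = m
    · rw [insertBy_append x _ _ (by intro p hp; have := hF p hp; omega),
          insertBy_front x _ (by intro p hp; have := hS p hp; omega)]
      simp [List.filter_append, hx]
    · have hxm : m < x.2 := by
        have := hm x (by simp)
        omega
      rw [insertBy_append x _ _ (by intro p hp; have := hF p hp; omega)]
      simp [List.filter_append, hx, sorted_append_singleton]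

-- main lemma: sorting the DFS records of a valid queue by depth gives the level-order emission
lemma sorted_goR_eq_lvl (a : List Int) :
    ∀ (k : Nat) (q : List (Int × Int)) (d : Int), pvMu q ≤ k → (∀ r ∈ q, r.1 < r.2) →
      (PySem.List.sorted (q.flatMap (fun r => goR a r.1 r.2 d)) (fun p => p.2)).map (fun p => p.1)
        = pvLvl a q := by
  intro k
  induction k with
  | zero =>
    intro q d hk hv
    have hq : q = [] := by
      cases q with
      | nil => rfl
      | cons r t =>
        exfalso
        have h1 : 1 ≤ pvW r := by simp [pvW]
        simp [pvMu] at hk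
        omega
    subst hq
    rw [pvLvl]
    simp [PySem.List.sorted_eq_foldl_insertBy]
  | succ k ih =>
    intro q d hk hv
    by_cases hq : q = []
    · subst hq
      rw [pvLvl]
      simp [PySem.List.sorted_eq_foldl_insertBy]
    · have hdepth : ∀ r ∈ q, ∀ p ∈ goR a r.1 r.2 (d + 1), d + 1 ≤ p.2 := by
        intro r _ p hp
        exact goR_depth a ((r.2 - r.1).toNat) r.1 r.2 (d + 1) le_rfl p hp
      have hkeys : ∀ p ∈ q.flatMap (fun r => goR a r.1 r.2 d), d ≤ p.2 := by
        intro p hp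
        rw [List.mem_flatMap] at hp
        obtain ⟨r, _, hpr⟩ := hp
        exact goR_depth a ((r.2 - r.1).toNat) r.1 r.2 d le_rfl p hpr
      have htail : ∀ r ∈ q, ∀ p ∈ (pvCh r).flatMap (fun r' => goR a r'.1 r'.2 (d + 1)), d + 1 ≤ p.2 := by
        intro r _ p hp
        rw [List.mem_flatMap] at hp
        obtain ⟨r', _, hpr⟩ := hp
        exact goR_depth a ((r'.2 - r'.1).toNat) r'.1 r'.2 (d + 1) le_rfl p hpr
      have hF : (q.flatMap (fun r => goR a r.1 r.2 d)).filter (fun p => decide (p.2 = d)) =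
          q.map (fun r => (pvVal a r, d)) := by
        rw [List.filter_flatMap]
        have : ∀ r ∈ q, ((fun r => goR a r.1 r.2 d) r).filter (fun p => decide (p.2 = d)) =
            [(pvVal a r, d)] := by
          intro r hr
          simp only
          rw [goR_shape a r.1 r.2 d (hv r hr)]
          rw [List.filter_cons]
          simp only [decide_eq_true_eq, if_true]
          congr 1
          rw [List.filter_eq_nil_iff]
          intro p hp
          have := htail r hr p hp
          simp only [decide_eq_true_eq]
          omega
        calc (q.flatMap fun r => ((fun r => goR a r.1 r.2 d) r).filter (fun p => decide (p.2 = d)))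
            = q.flatMap (fun r => [(pvVal a r, d)]) := List.flatMap_congr this
          _ = q.map (fun r => (pvVal a r, d)) := List.map_eq_flatMap.symm
      have hG : (q.flatMap (fun r => goR a r.1 r.2 d)).filter (fun p => decide (p.2 ≠ d)) =
          (q.flatMap pvCh).flatMap (fun r => goR a r.1 r.2 (d + 1)) := by
        rw [List.filter_flatMap]
        have : ∀ r ∈ q, ((fun r => goR a r.1 r.2 d) r).filter (fun p => decide (p.2 ≠ d)) =
            (pvCh r).flatMap (fun r' => goR a r'.1 r'.2 (d + 1)) := by
          intro r hr
          simp only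
          rw [goR_shape a r.1 r.2 d (hv r hr)]
          rw [List.filter_cons]
          simp only [decide_eq_true_eq]
          rw [if_neg (by simp)]
          rw [List.filter_eq_self.mpr]
          intro p hp
          have := htail r hr p hp
          simp only [ne_eq, decide_eq_true_eq]
          omega
        rw [List.flatMap_congr this, List.flatMap_assoc]
      rw [sorted_peel _ d hkeys, List.map_append, hF, hG]
      have hv' : ∀ r ∈ q.flatMap pvCh, r.1 < r.2 := by
        intro r hr
        rw [List.mem_flatMap] at hr
        obtain ⟨r', _, hrr⟩ := hr
        exact pvCh_valid r' r hrr
      have hlt := pvMu_flatMap_lt q hq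
      rw [ih (q.flatMap pvCh) (d + 1) (by omega) hv']
      conv_rhs => rw [pvLvl, dif_neg hq]
      congr 1
      simp only [List.map_map]
      rfl

-- ===== VERDICT (by name: the statement is the Claim_ definition above) =====
theorem bestOrder_spec : Claim_equal_bestOrder := by
  intro a _
  unfold Spec_bestOrder bestOrder bestOrder_alt
  by_cases ha : a = []
  · rw [if_pos ha, ha]
    rw [goA]
    simp [PySem.List.sorted_eq_foldl_insertBy, bfsB]
  · rw [if_neg ha]
    have hn : 0 < a.length := List.length_pos_iff.mpr ha
    have h1 : goA a 0 = goR a 0 (a.length : Int) 0 := by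
      have := goA_eq_goR a a.length 0 a.length 0 (by omega) le_rfl (by omega)
      simpa using this
    have h3 := sorted_goR_eq_lvl a (pvMu [((0 : Int), (a.length : Int))])
        [((0 : Int), (a.length : Int))] 0 le_rfl
        (by intro r hr; simp at hr; subst hr; simpa using hn)
    simp only [List.flatMap_cons, List.flatMap_nil, List.append_nil] at h3
    have h2 := bfsB_eq_lvl a (pvMu [((0 : Int), (a.length : Int))])
        [((0 : Int), (a.length : Int))] [] le_rfl
    rw [h1, h3, h2]
    simp
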